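-- pv_equiv track=rewrite | github.com/HannahYH/My-Projects | NLP/project_nlp.py | is_entity_in
-- ===== SOURCE A (Python) =====
-- def is_entity_in(entity, Q):
--     previous_index = 0
--     pop_index = 0
--     entity_is_in_Q = True
--     words_of_entity = entity.split(' ')
--     for word in words_of_entity:
--         try:
--             pop_index = Q.index(word, previous_index)
--             Q.pop(pop_index)
--             previous_index = pop_index
--         except ValueError: # word cannot be found
--             entity_is_in_Q = False
--             break
--     return entity_is_in_Q
-- ===== SOURCE B (Python) =====
-- def is_entity_in(entity, Q):
--     # Two-pointer subsequence scan over Q, then one rebuild of Q that deletes the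
--     # matched elements (same observable mutation as A's pops).
--     words = entity.split(' ')
--     matched = []
--     qi = 0
--     wi = 0
--     while wi < len(words) and qi < len(Q):
--         if Q[qi] == words[wi]:
--             matched.append(qi)
--             wi += 1
--         qi += 1
--     ok = wi == len(words)
--     ms = set(matched)
--     Q[:] = [x for i, x in enumerate(Q) if i not in ms]
--     return ok
-- ===== Notes on version B (the rewrite author's own statement) =====
-- stated objective: alternative
-- what changed: A repeatedly calls Q.index(word, start) and Q.pop(i) per entity word, mutating Q as it scans; B does one two-pointer subsequence scan over the unchanged Q and removes the matched elements in a single rebuild at the end.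
import Mathlib
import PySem

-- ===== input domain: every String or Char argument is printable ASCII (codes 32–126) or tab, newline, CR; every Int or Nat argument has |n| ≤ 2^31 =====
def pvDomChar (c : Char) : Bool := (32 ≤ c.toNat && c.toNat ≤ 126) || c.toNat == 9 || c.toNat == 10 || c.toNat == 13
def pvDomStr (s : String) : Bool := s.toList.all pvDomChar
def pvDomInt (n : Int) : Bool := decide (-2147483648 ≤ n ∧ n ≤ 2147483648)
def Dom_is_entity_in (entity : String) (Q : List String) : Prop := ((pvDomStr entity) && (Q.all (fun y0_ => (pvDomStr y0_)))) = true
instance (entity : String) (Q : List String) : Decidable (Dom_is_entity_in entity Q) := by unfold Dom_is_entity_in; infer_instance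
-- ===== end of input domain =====

-- B replaces A's per-word Q.index(word, start) + Q.pop loop by a single two-pointer
-- subsequence scan (objective: alternative decomposition). Both A and B mutate the Python list Q
-- in the same way; the equivalence proved here is about the RETURN value only.


-- ===== PORT A =====
-- A's loop state: the (mutated) list Q and previous_index (always a valid Nat here).
-- entity.split(' ') with nonempty literal sep is split? … |>.getD [] (the none branch is sep="" only, never taken).
-- Q.index(word, prev) is ported by hand as (index? (Q.drop prev)).map (· + prev):
-- exact for 0 ≤ prev ≤ Q.length, which the loop maintains.
def isEntityInLoop : List String → List String → Nat → Bool
  | [], _, _ => true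
  | word :: ws, Q, prev =>
    match (PySem.List.index? (Q.drop prev) word).map (· + prev) with
    | none => false                       -- ValueError branch: entity_is_in_Q = False; break
    | some popIndex =>
      match PySem.List.pop? Q (popIndex : Int) with
      | none => false                     -- unreachable: popIndex is a valid index
      | some (_, Q') => isEntityInLoop ws Q' popIndex

def is_entity_in (entity : String) (Q : List String) : Bool :=
  isEntityInLoop ((PySem.Str.split? entity " ").getD []) Q 0

-- ===== PORT B =====
-- Source B's while loop: advance qi over Q, advancing wi over words on a match;
-- ok ↔ all words consumed. (The rebuild of Q is a side effect, not the return value.)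
def isEntityInScan : List String → List String → Bool
  | [], _ => true
  | _ :: _, [] => false
  | word :: ws, q :: qs => if q == word then isEntityInScan ws qs else isEntityInScan (word :: ws) qs

def is_entity_in_alt (entity : String) (Q : List String) : Bool :=
  isEntityInScan ((PySem.Str.split? entity " ").getD []) Q

-- ===== PRECONDITION & SPEC =====
def Spec_is_entity_in (entity : String) (Q : List String) (out : Bool) : Prop := out = is_entity_in_alt entity Q
instance (entity : String) (Q : List String) (out : Bool) : Decidable (Spec_is_entity_in entity Q out) := by unfold Spec_is_entity_in; infer_instance

-- ===== CLAIM (what is proved, stated in full; the proofs are below) =====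
def Claim_equal_is_entity_in : Prop := ∀ (entity : String) (Q : List String), Dom_is_entity_in entity Q → Spec_is_entity_in entity Q (is_entity_in entity Q)

-- ===== LEMMAS AND PROOFS =====

lemma scan_of_not_mem (word : String) (ws S : List String) (h : word ∉ S) :
    isEntityInScan (word :: ws) S = false := by
  induction S with
  | nil => rfl
  | cons q qs ih =>
    simp only [List.mem_cons, not_or] at h
    have hq : (q == word) = false := by
      simp only [beq_eq_false_iff_ne]; exact fun e => h.1 e.symm
    simp [isEntityInScan, hq, ih h.2]

lemma scan_skip (word : String) (ws pre suf : List String) (h : word ∉ pre) :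
    isEntityInScan (word :: ws) (pre ++ word :: suf) = isEntityInScan ws suf := by
  induction pre with
  | nil => simp [isEntityInScan]
  | cons p ps ih =>
    simp only [List.mem_cons, not_or] at h
    have hp : (p == word) = false := by
      simp only [beq_eq_false_iff_ne]; exact fun e => h.1 e.symm
    simp [isEntityInScan, hp, ih h.2]

lemma eraseIdx_append_cons (L suf : List String) (x : String) :
    (L ++ x :: suf).eraseIdx L.length = L ++ suf := by
  induction L with
  | nil => rfl
  | cons a as ih => simpa [List.eraseIdx] using ih

lemma loop_eq_scan (ws : List String) : ∀ (P S : List String),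
    isEntityInLoop ws (P ++ S) P.length = isEntityInScan ws S := by
  induction ws with
  | nil => intro P S; simp [isEntityInLoop, isEntityInScan]
  | cons word rest ih =>
    intro P S
    simp only [isEntityInLoop, List.drop_left]
    cases hidx : PySem.List.index? S word with
    | none =>
      rw [PySem.List.index?_eq_none_iff] at hidx
      simp [scan_of_not_mem word rest S hidx]
    | some k =>
      rw [PySem.List.index?_eq_some_iff] at hidx
      obtain ⟨pre, suf, hS, hlen, hnot⟩ := hidx
      have hlt : k + P.length < (P ++ S).length := by
        subst hS; simp [← hlen]; omega
      have hpop := PySem.List.pop?_natCast (P ++ S) (k + P.length) hlt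
      simp only [Option.map_some, hpop]
      have herase : (P ++ S).eraseIdx (k + P.length) = (P ++ pre) ++ suf := by
        subst hS
        have : P ++ (pre ++ word :: suf) = (P ++ pre) ++ word :: suf := by simp
        rw [this]
        have hl : k + P.length = (P ++ pre).length := by simp [← hlen]; omega
        rw [hl, eraseIdx_append_cons]
      rw [herase]
      have hlen2 : k + P.length = (P ++ pre).length := by simp [← hlen]; omega
      rw [hlen2, ih (P ++ pre) suf]
      subst hS
      exact (scan_skip word rest pre suf hnot).symm

-- ===== VERDICT (by name: the statement is the Claim_ definition above) =====
theorem is_entity_in_spec : Claim_equal_is_entity_in := by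
  intro entity Q _
  unfold Spec_is_entity_in is_entity_in is_entity_in_alt
  simpa using loop_eq_scan ((PySem.Str.split? entity " ").getD []) [] Q
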